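-- pv_equiv track=rewrite | github.com/ruzhai/NJU-SICP2024FALL | hw01-Code/hw01.py | double_ones
-- ===== SOURCE A (Python) =====
-- def double_ones(n):
--     """Return true if n has two ones in a row.
--
--     >>> double_ones(1)
--     False
--     >>> double_ones(11)
--     True
--     >>> double_ones(2112)
--     True
--     >>> double_ones(110011)
--     True
--     >>> double_ones(12345)
--     False
--     >>> double_ones(10101010)
--     False
--     """
--     "*** YOUR CODE HERE ***"
--
--     while n > 0:
--         if n % 10 == 1:
--             if (n//10) % 10 == 1:
--                 return True
--             else:
--                  n = n // 100
--
--
--         else: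
--                 n = n // 10
--     if n == 0:
--         return False
-- ===== SOURCE B (Python) =====
-- def double_ones(n):
--     """Return true if n has two ones in a row."""
--     prev = 0
--     while n > 0:
--         d = n % 10
--         if d == 1 and prev == 1:
--             return True
--         prev = d
--         n //= 10
--     return False
-- ===== Notes on version B (the rewrite author's own statement) =====
-- stated objective: simpler
-- what changed: Replaces A's two-digit lookahead with variable //100 skip by a single-digit scan that remembers the previous digit in a variable, one division per step.
-- outside the precondition, e.g. on double_ones(-11): A returns None, B returns False
import Mathlib
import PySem

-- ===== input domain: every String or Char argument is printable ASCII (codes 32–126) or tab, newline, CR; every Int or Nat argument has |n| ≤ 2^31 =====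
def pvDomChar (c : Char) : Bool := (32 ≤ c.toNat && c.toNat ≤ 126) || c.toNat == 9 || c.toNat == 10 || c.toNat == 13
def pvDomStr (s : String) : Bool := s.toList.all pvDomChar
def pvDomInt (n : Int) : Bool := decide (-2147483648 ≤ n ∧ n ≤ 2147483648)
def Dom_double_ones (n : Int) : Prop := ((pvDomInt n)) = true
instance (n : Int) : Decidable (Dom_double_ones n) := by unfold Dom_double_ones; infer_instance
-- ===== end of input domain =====

-- B replaces A's two-digit lookahead and //100 skip by a previous-digit memory scan; objective: simpler.

-- ===== PORT A =====
-- while n > 0: if n%10==1: (if (n//10)%10==1: return True else n//=100) else n//=10 ; then if n==0: return False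
def double_ones (n : Int) : Bool :=
  if _h : n > 0 then
    if PySem.Int.mod n 10 == 1 then
      if PySem.Int.mod (PySem.Int.floordiv n 10) 10 == 1 then true
      else double_ones (PySem.Int.floordiv n 100)
    else double_ones (PySem.Int.floordiv n 10)
  else
    -- after the loop Python returns False for n == 0 (n < 0 is excluded by Pre_: A falls through with None)
    false
termination_by n.toNat
decreasing_by
  · have h1 : PySem.Int.floordiv n 100 = n / 100 := PySem.Int.floordiv_eq_ediv_of_pos (by omega)
    rw [h1]; omega
  · have h1 : PySem.Int.floordiv n 10 = n / 10 := PySem.Int.floordiv_eq_ediv_of_pos (by omega)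
    rw [h1]; omega

-- ===== PORT B =====
-- the while loop of Source B, state (prev, n); returns False when the loop exits
def altLoop (prev : Int) (n : Int) : Bool :=
  if _h : n > 0 then
    let d := PySem.Int.mod n 10
    if d == 1 && prev == 1 then true
    else altLoop d (PySem.Int.floordiv n 10)
  else false
termination_by n.toNat
decreasing_by
  have h1 : PySem.Int.floordiv n 10 = n / 10 := PySem.Int.floordiv_eq_ediv_of_pos (by omega)
  rw [h1]; omega

def double_ones_alt (n : Int) : Bool := altLoop 0 n

-- ===== PRECONDITION & SPEC =====
-- Pre_ excludes n < 0, on which A's loop never runs and A falls through returning None (not a bool).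
def Pre_double_ones (n : Int) : Prop := 0 ≤ n
instance (n : Int) : Decidable (Pre_double_ones n) := by unfold Pre_double_ones; infer_instance
def pvWitness_double_ones : Int := (2112)

def Spec_double_ones (n : Int) (out : Bool) : Prop := out = double_ones_alt n
instance (n : Int) (out : Bool) : Decidable (Spec_double_ones n out) := by unfold Spec_double_ones; infer_instance

-- ===== CLAIM (what is proved, stated in full; the proofs are below) =====
def Claim_equal_double_ones : Prop := ∀ (n : Int), Dom_double_ones n → Pre_double_ones n → Spec_double_ones n (double_ones n)

-- ===== LEMMAS AND PROOFS =====

-- core invariant: when the previous digit is not 1, B's loop agrees with A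
theorem aux_eq (k : Nat) : ∀ (n p : Int), n.toNat = k → 0 ≤ n → p ≠ 1 →
    double_ones n = altLoop p n := by
  induction k using Nat.strong_induction_on with
  | _ k ih =>
    intro n p hk hn hp
    by_cases hpos : n > 0
    · have hd10 : PySem.Int.floordiv n 10 = n / 10 := PySem.Int.floordiv_eq_ediv_of_pos (by omega)
      have hd100 : PySem.Int.floordiv n 100 = n / 100 := PySem.Int.floordiv_eq_ediv_of_pos (by omega)
      have hm : PySem.Int.mod n 10 = n % 10 := PySem.Int.mod_eq_emod_of_pos (by omega)
      have hm2 : PySem.Int.mod (n / 10) 10 = n / 10 % 10 := by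
        by_cases hq : 0 < n / 10
        · exact PySem.Int.mod_eq_emod_of_pos (by omega)
        · have hz : n / 10 = 0 := by omega
          rw [hz]; decide
      have h100 : n / 10 / 10 = n / 100 := by
        rw [Int.ediv_ediv_of_nonneg (by norm_num : (0:Int) ≤ 10)]; norm_num
      have eB1 : altLoop p n = altLoop (n % 10) (n / 10) := by
        rw [altLoop]
        simp only [hpos, dif_pos, hm, hd10]
        rw [if_neg (by simp [hp])]
      by_cases h1 : n % 10 = 1
      · by_cases h2 : n / 10 % 10 = 1
        · -- pair found: both return true
          have hq : 0 < n / 10 := by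
            by_contra hq
            have : n / 10 = 0 := by omega
            simp [this] at h2
          have eB2 : altLoop (n % 10) (n / 10) = true := by
            rw [altLoop]
            simp [hq, h2, h1]
          rw [double_ones]
          simp only [hpos, dif_pos, hm, hd10, hm2]
          rw [if_pos (by simpa using h1), if_pos (by simpa using h2), eB1, eB2]
        · -- lone 1: A skips to n/100; B steps through n/10 to n/100
          rw [double_ones]
          simp only [hpos, dif_pos, hm, hd10, hd100, hm2]
          rw [if_pos (by simpa using h1), if_neg (by simpa using h2), eB1]
          by_cases hq : 0 < n / 10
          · have hd2 : PySem.Int.floordiv (n / 10) 10 = n / 10 / 10 :=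
              PySem.Int.floordiv_eq_ediv_of_pos (by omega)
            have eB2 : altLoop (n % 10) (n / 10) = altLoop (n / 10 % 10) (n / 100) := by
              rw [altLoop]
              simp only [hq, dif_pos, hm2, hd2, h100]
              rw [if_neg (by simp [h2])]
            rw [eB2]
            have hlt : (n / 100).toNat < k := by
              have hle : n / 100 ≤ n / 10 := by rw [← h100]; exact Int.ediv_le_self _ (by positivity)
              have ha : n / 10 < n := by omega
              omega
            exact ih _ hlt _ _ rfl (by positivity) h2
          · have hz : n / 10 = 0 := by omega
            have hz100 : n / 100 = 0 := by rw [← h100, hz]; decide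
            rw [hz100, double_ones, altLoop]
            simp [hz]
      · -- last digit not 1: both step onto n/10 with a non-1 previous digit
        rw [double_ones]
        simp only [hpos, dif_pos, hm, hd10]
        rw [if_neg (by simpa using h1), eB1]
        have ha : n / 10 < n := by omega
        exact ih (n / 10).toNat (by omega) _ _ rfl (by positivity) h1
    · rw [double_ones, altLoop]
      simp [hpos]

-- ===== VERDICT (by name: the statement is the Claim_ definition above) =====
theorem double_ones_spec : Claim_equal_double_ones := by
  intro n _ hpre
  unfold Spec_double_ones double_ones_alt
  exact aux_eq n.toNat n 0 rfl hpre (by norm_num)
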